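-- pv_equiv track=rewrite | github.com/avaughn271/AdmixtureBayes | admixturebayes/Rtree_operations.py | pretty_string
-- ===== SOURCE A (Python) =====
-- def node_is_admixture(node):
--     return (node[1] is not None)
--
-- def node_is_coalescence(node):
--     return (node[1] is None and node[5] is not None)
--
-- def node_is_leaf_node(node):
--     return (node[1] is None and node[5] is None)
--
-- def pretty_string(tree):
--     keys,vals=list(tree.keys()),list(tree.values())
--     res=''
--     res+='{ '+'\n'
--     for key,val in zip(keys,vals):
--         if node_is_leaf_node(val):
--             res+='  '+key+': '+str(val)+'\n'
--     res+='  ,'+'\n'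
--     for key,val in zip(keys,vals):
--         if node_is_admixture(val):
--             res+='  '+key+': '+str(val)+'\n'
--     res+='  ,'+'\n'
--     for key,val in zip(keys,vals):
--         if node_is_coalescence(val):
--             res+='  '+key+': '+str(val)+'\n'
--     res+='}'
--     return res
-- ===== SOURCE B (Python) =====
-- def pretty_string(tree):
--     leaves, adms, coals = [], [], []
--     for key, val in tree.items():
--         line = '  ' + key + ': ' + str(val) + '\n'
--         if val[1] is None and val[5] is None:
--             leaves.append(line)
--         elif val[1] is not None:
--             adms.append(line)
--         else:
--             coals.append(line)
--     return '{ \n' + ''.join(leaves) + '  ,\n' + ''.join(adms) + '  ,\n' + ''.join(coals) + '}'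
-- ===== Notes on version B (the rewrite author's own statement) =====
-- stated objective: simpler
-- what changed: A makes three filtered passes over the dict (leaves, admixtures, coalescences) appending to one result string; B makes a single pass that classifies each node once and appends its formatted line to one of three buckets, then joins the buckets.
import Mathlib
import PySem

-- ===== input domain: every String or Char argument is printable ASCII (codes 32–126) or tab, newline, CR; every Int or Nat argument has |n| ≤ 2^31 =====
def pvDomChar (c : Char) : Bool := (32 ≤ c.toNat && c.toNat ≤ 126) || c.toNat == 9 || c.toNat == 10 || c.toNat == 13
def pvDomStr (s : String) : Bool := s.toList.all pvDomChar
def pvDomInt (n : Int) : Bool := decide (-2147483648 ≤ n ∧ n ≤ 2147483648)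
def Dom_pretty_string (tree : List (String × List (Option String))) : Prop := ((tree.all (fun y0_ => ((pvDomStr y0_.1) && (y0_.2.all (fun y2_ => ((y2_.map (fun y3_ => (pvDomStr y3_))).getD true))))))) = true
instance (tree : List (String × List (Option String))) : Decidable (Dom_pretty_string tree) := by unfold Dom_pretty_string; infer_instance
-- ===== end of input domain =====

-- B replaces A's three filtered passes over the dict by a single pass that buckets each
-- formatted line into one of three lists (simpler/one-pass decomposition; same output).

-- ===== PORT A =====
-- shared helper: Python's str(val) for val : list[Optional[str]] — repr of each string
-- (exact on the Dom alphabet: printable ASCII plus tab/newline/CR), 'None' for None,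
-- joined with ', ' inside '[' ']'.  Used by both ports because both Pythons call str(val).
def pyReprChars (s : List Char) : List Char :=
  let q : Char := if s.contains '\'' && !(s.contains '"') then '"' else '\''
  q :: s.flatMap (fun c =>
    if c = '\\' then ['\\', '\\']
    else if c = q then ['\\', q]
    else if c = '\t' then ['\\', 't']
    else if c = '\n' then ['\\', 'n']
    else if c = '\r' then ['\\', 'r']
    else [c]) ++ [q]

def pyStrNodeChars (v : List (Option String)) : List Char :=
  '[' :: PySem.Chars.join [',', ' ']
      (v.map (fun o => match o with
        | none => ['N', 'o', 'n', 'e']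
        | some s => pyReprChars s.toList)) ++ [']']

-- shared helper: the formatted line '  '+key+': '+str(val)+'\n' (both Pythons build it)
def lineChars (key : String) (v : List (Option String)) : List Char :=
  ' ' :: ' ' :: key.toList ++ [':', ' '] ++ pyStrNodeChars v ++ ['\n']

-- node[1] is not None
def nIsAdm (v : List (Option String)) : Bool := (PySem.List.pyGetD v 1 none).isSome
-- node[1] is None and node[5] is not None
def nIsCoal (v : List (Option String)) : Bool :=
  !(PySem.List.pyGetD v 1 none).isSome && (PySem.List.pyGetD v 5 none).isSome
-- node[1] is None and node[5] is None
def nIsLeaf (v : List (Option String)) : Bool :=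
  !(PySem.List.pyGetD v 1 none).isSome && !(PySem.List.pyGetD v 5 none).isSome

def pretty_string (tree : List (String × List (Option String))) : String :=
  let res := "{ \n".toList
  let res := tree.foldl (fun r kv => if nIsLeaf kv.2 then r ++ lineChars kv.1 kv.2 else r) res
  let res := res ++ "  ,\n".toList
  let res := tree.foldl (fun r kv => if nIsAdm kv.2 then r ++ lineChars kv.1 kv.2 else r) res
  let res := res ++ "  ,\n".toList
  let res := tree.foldl (fun r kv => if nIsCoal kv.2 then r ++ lineChars kv.1 kv.2 else r) res
  String.ofList (res ++ ['}'])

-- ===== PORT B =====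
-- one pass: classify each node, append its line to the matching bucket
def bStep (acc : List (List Char) × List (List Char) × List (List Char))
    (kv : String × List (Option String)) :
    List (List Char) × List (List Char) × List (List Char) :=
  let line := lineChars kv.1 kv.2
  if !(PySem.List.pyGetD kv.2 1 none).isSome && !(PySem.List.pyGetD kv.2 5 none).isSome then
    (acc.1 ++ [line], acc.2.1, acc.2.2)
  else if (PySem.List.pyGetD kv.2 1 none).isSome then
    (acc.1, acc.2.1 ++ [line], acc.2.2)
  else
    (acc.1, acc.2.1, acc.2.2 ++ [line])

def pretty_string_alt (tree : List (String × List (Option String))) : String :=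
  let b := tree.foldl bStep ([], [], [])
  String.ofList ("{ \n".toList ++ PySem.Chars.join [] b.1
    ++ "  ,\n".toList ++ PySem.Chars.join [] b.2.1
    ++ "  ,\n".toList ++ PySem.Chars.join [] b.2.2 ++ ['}'])

-- ===== PRECONDITION & SPEC =====
-- Pre_ excludes exactly the inputs on which the Python A raises IndexError (a node of
-- length < 2, or length < 6 with node[1] = None); B raises there identically.
def Pre_pretty_string (tree : List (String × List (Option String))) : Prop :=
  ∀ p ∈ tree, 2 ≤ p.2.length ∧ (p.2[1]? = some none → 6 ≤ p.2.length)
instance (tree : List (String × List (Option String))) : Decidable (Pre_pretty_string tree) := by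
  unfold Pre_pretty_string; infer_instance

def pvWitness_pretty_string : (List (String × List (Option String))) :=
  [("a", [none, none, none, none, none, none]), ("b", [none, some "x", none, none, none, none, none])]

def Spec_pretty_string (tree : List (String × List (Option String))) (out : String) : Prop := out = pretty_string_alt tree
instance (tree : List (String × List (Option String))) (out : String) : Decidable (Spec_pretty_string tree out) := by unfold Spec_pretty_string; infer_instance

-- ===== CLAIM (what is proved, stated in full; the proofs are below) =====
def Claim_equal_pretty_string : Prop := ∀ (tree : List (String × List (Option String))), Dom_pretty_string tree → Pre_pretty_string tree → Spec_pretty_string tree (pretty_string tree)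

-- ===== LEMMAS AND PROOFS =====

theorem join_nil_eq_flatten (ls : List (List Char)) :
    PySem.Chars.join [] ls = ls.flatten := by
  unfold PySem.Chars.join List.intercalate
  induction ls with
  | nil => simp
  | cons h t ih => cases t <;> simp_all [List.intersperse]

theorem foldA_eq_flatMap (p : List (Option String) → Bool)
    (t : List (String × List (Option String))) (r : List Char) :
    t.foldl (fun r kv => if p kv.2 then r ++ lineChars kv.1 kv.2 else r) r
      = r ++ t.flatMap (fun kv => if p kv.2 then lineChars kv.1 kv.2 else []) := by
  have h : (fun (r : List Char) (kv : String × List (Option String)) =>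
        if p kv.2 then r ++ lineChars kv.1 kv.2 else r)
      = (fun r kv => r ++ if p kv.2 then lineChars kv.1 kv.2 else []) := by
    funext r kv; split <;> simp
  rw [h, PySem.List.foldl_append_eq_flatMap]

theorem foldB_eq (t : List (String × List (Option String)))
    (l a c : List (List Char)) :
    t.foldl bStep (l, a, c)
      = (l ++ t.flatMap (fun kv => if nIsLeaf kv.2 then [lineChars kv.1 kv.2] else []),
         a ++ t.flatMap (fun kv => if nIsAdm kv.2 then [lineChars kv.1 kv.2] else []),
         c ++ t.flatMap (fun kv => if nIsCoal kv.2 then [lineChars kv.1 kv.2] else [])) := by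
  induction t generalizing l a c with
  | nil => simp
  | cons kv t ih =>
    cases h1 : PySem.List.pyGetD kv.2 1 none <;>
      cases h5 : PySem.List.pyGetD kv.2 5 none <;>
        simp [List.foldl_cons, bStep, nIsLeaf, nIsAdm, nIsCoal, h1, h5, ih]

theorem flatten_flatMap_ite (p : List (Option String) → Bool)
    (t : List (String × List (Option String))) :
    (t.flatMap (fun kv => if p kv.2 then [lineChars kv.1 kv.2] else [])).flatten
      = t.flatMap (fun kv => if p kv.2 then lineChars kv.1 kv.2 else []) := by
  induction t with
  | nil => simp
  | cons kv t ih => by_cases h : p kv.2 <;> simp [h, ih]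

-- ===== VERDICT (by name: the statement is the Claim_ definition above) =====
theorem pretty_string_spec : Claim_equal_pretty_string := by
  intro tree _ _
  unfold Spec_pretty_string pretty_string pretty_string_alt
  rw [foldB_eq]
  simp only [List.nil_append, join_nil_eq_flatten, flatten_flatMap_ite,
    foldA_eq_flatMap]
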